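-- pv_equiv track=rewrite | github.com/RupertJoo/TIL_SSAFY | knights.py | solution
-- ===== SOURCE A (Python) =====
-- def solution(number, limit, power):
--     knights = [0] * (number + 1)
--     for i in range (1, number + 1):
--         for j in range(i, number + 1, i):
--             knights[j] += 1
--     knights = list(map(lambda x: power if x > limit  else x, knights))
--     answer = sum(knights)
--     return answer
-- ===== SOURCE B (Python) =====
-- def solution(number, limit, power):
--     # divisor-pair sieve: each (d, q) with d <= q and d*q <= number contributes
--     # to counts[d*q]; 1 when d == q, else 2.
--     counts = [0] * (number + 1)
--     d = 1
--     while d * d <= number: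
--         counts[d * d] += 1
--         for j in range(d * (d + 1), number + 1, d):
--             counts[j] += 2
--         d += 1
--     total = 0
--     for c in counts[1:]:
--         total += power if c > limit else c
--     return total
-- ===== Notes on version B (the rewrite author's own statement) =====
-- stated objective: faster
-- what changed: A sieves every i in 1..n over all its multiples and then maps/sums the whole table with the threshold; B enumerates only divisor pairs (d, q) with d <= sqrt(n) (adding 2 per proper pair, 1 for d*d) and sums the thresholded counts of knights 1..n in one pass.
-- intended difference: When number >= 0, limit < 0 and power != 0, A also applies the threshold to the unused index-0 zero of its table and returns the total plus an extra power; B sums only knights 1..number, which is the intended total. — e.g. on solution(1, -1, 5): A returns 10, B returns 5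
import Mathlib
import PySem

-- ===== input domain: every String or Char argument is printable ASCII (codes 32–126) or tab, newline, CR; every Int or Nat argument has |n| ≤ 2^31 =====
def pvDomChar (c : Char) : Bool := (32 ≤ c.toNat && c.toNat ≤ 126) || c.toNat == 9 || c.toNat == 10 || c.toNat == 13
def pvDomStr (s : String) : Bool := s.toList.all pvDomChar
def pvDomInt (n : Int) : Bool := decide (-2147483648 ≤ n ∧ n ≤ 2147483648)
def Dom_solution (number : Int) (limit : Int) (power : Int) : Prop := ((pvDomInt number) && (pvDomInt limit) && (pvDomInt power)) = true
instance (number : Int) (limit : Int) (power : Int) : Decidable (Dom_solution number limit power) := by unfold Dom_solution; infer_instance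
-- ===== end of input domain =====

-- B replaces A's per-divisor multiple sieve (plus a map-then-sum pass over the whole table)
-- by a divisor-PAIR sieve (d ≤ √n, weight 2 per proper pair, 1 for d·d) summing the
-- thresholded counts of knights 1..number in one pass; on number ≥ 0 with limit < 0 A also
-- thresholds its unused index-0 zero, an intended difference stated in D_solution below.

-- ===== PORT A =====
def solution (number : Int) (limit : Int) (power : Int) : Int :=
  let knights : List Int := List.replicate (number + 1).toNat 0
  let knights := (PySem.List.pyRange 1 (number + 1) 1).foldl
    (fun ks i => (PySem.List.pyRange i (number + 1) i).foldl
      (fun ks j => PySem.List.pySetD ks j (PySem.List.pyGetD ks j 0 + 1)) ks) knights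
  let knights := knights.map (fun x => if limit < x then power else x)
  knights.sum

-- ===== PORT B =====
-- while d * d <= number: counts[d*d] += 1; for j in range(d*(d+1), number+1, d): counts[j] += 2
def bSieveLoop (n : Int) (d : Int) (counts : List Int) : List Int :=
  if _h : d * d ≤ n then
    let counts1 := PySem.List.pySetD counts (d * d) (PySem.List.pyGetD counts (d * d) 0 + 1)
    let counts2 := (PySem.List.pyRange (d * (d + 1)) (n + 1) d).foldl
      (fun cs j => PySem.List.pySetD cs j (PySem.List.pyGetD cs j 0 + 2)) counts1
    bSieveLoop n (d + 1) counts2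
  else counts
termination_by (n + 1 - d).toNat
decreasing_by
  have h2 : 2 * d ≤ n + 1 := by nlinarith [sq_nonneg (d - 1)]
  have h0 : (0:Int) ≤ n := by nlinarith [sq_nonneg d]
  omega

def solution_alt (number : Int) (limit : Int) (power : Int) : Int :=
  let counts := bSieveLoop number 1 (List.replicate (number + 1).toNat 0)
  (PySem.List.slice counts (some 1) none).foldl
    (fun t c => t + (if limit < c then power else c)) 0

-- ===== PRECONDITION & SPEC =====
-- When number >= 0, limit < 0 and power != 0, A also applies the threshold to the unused
-- index-0 zero of its table and returns the total plus an extra power; B sums only knights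
-- 1..number, which is the intended total.
def D_solution (number : Int) (limit : Int) (power : Int) : Prop :=
  0 ≤ number ∧ limit < 0 ∧ power ≠ 0
instance (number : Int) (limit : Int) (power : Int) : Decidable (D_solution number limit power) := by unfold D_solution; infer_instance

def Spec_solution (number : Int) (limit : Int) (power : Int) (out : Int) : Prop :=
  ¬ D_solution number limit power → out = solution_alt number limit power
instance (number : Int) (limit : Int) (power : Int) (out : Int) : Decidable (Spec_solution number limit power out) := by unfold Spec_solution; infer_instance

def pvDiffWitness_solution : Int × Int × Int := (1, -1, 5)
def pvDiffWitnessOut_solution : Int × Int := (10, 5)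

-- ===== CLAIM (what is proved, stated in full; the proofs are below) =====
def Claim_unchanged_solution : Prop := ∀ (number : Int) (limit : Int) (power : Int), Dom_solution number limit power → Spec_solution number limit power (solution number limit power)
def Claim_changed_solution : Prop := Dom_solution (pvDiffWitness_solution.1) (pvDiffWitness_solution.2.1) (pvDiffWitness_solution.2.2) ∧ D_solution (pvDiffWitness_solution.1) (pvDiffWitness_solution.2.1) (pvDiffWitness_solution.2.2) ∧ solution (pvDiffWitness_solution.1) (pvDiffWitness_solution.2.1) (pvDiffWitness_solution.2.2) = pvDiffWitnessOut_solution.1 ∧ solution_alt (pvDiffWitness_solution.1) (pvDiffWitness_solution.2.1) (pvDiffWitness_solution.2.2) = pvDiffWitnessOut_solution.2 ∧ pvDiffWitnessOut_solution.1 ≠ pvDiffWitnessOut_solution.2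
def Claim_exact_solution : Prop := ∀ (number : Int) (limit : Int) (power : Int), Dom_solution number limit power → D_solution number limit power → solution number limit power ≠ solution_alt number limit power

-- ===== LEMMAS AND PROOFS =====

-- number of i in Finset.Icc 1 n dividing j and ≤ j: the divisor count of j (for 1 ≤ j ≤ n)
noncomputable def fcount (n : Int) (j : Int) : Int :=
  (((Finset.Icc 1 n).filter (fun i => i ∣ j ∧ i ≤ j)).card : Int)

-- the canonical table both sieves build
noncomputable def canon (n : Int) : List Int :=
  (List.range (n + 1).toNat).map (fun j : ℕ => fcount n (j : Int))

-- the set of pair generators still to be processed by bSieveLoop at counter d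
noncomputable def Ed (n d : Int) : Finset Int := (Finset.Icc d n).filter (fun e => e * e ≤ n)

-- per-generator contribution of bSieveLoop to table index k
noncomputable def gB (e : Int) (k : Int) : Int :=
  (if e * e = k then 1 else 0) + 2 * (if e ∣ k ∧ e * e < k then 1 else 0)

-- generic pointwise increment fold: counts[j] += w for j in L
theorem foldl_incr (w : Int) (L : List Int) (cs : List Int)
    (hL : ∀ j ∈ L, 0 ≤ j ∧ j < (cs.length : Int)) :
    (L.foldl (fun cs j => PySem.List.pySetD cs j (PySem.List.pyGetD cs j 0 + w)) cs).length = cs.length ∧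
    ∀ k : ℕ, (L.foldl (fun cs j => PySem.List.pySetD cs j (PySem.List.pyGetD cs j 0 + w)) cs).getD k 0
      = cs.getD k 0 + w * (L.count (k : Int)) := by
  induction L generalizing cs with
  | nil => simp
  | cons j L ih =>
    obtain ⟨hj0, hjlt⟩ := hL j (List.mem_cons_self)
    have hset : PySem.List.pySetD cs j (PySem.List.pyGetD cs j 0 + w)
        = cs.set j.toNat (cs.getD j.toNat 0 + w) := by
      rw [PySem.List.pySetD_of_nonneg _ _ hj0, PySem.List.pyGetD_of_nonneg _ _ hj0]
    simp only [List.foldl_cons]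
    have hlen' : (PySem.List.pySetD cs j (PySem.List.pyGetD cs j 0 + w)).length = cs.length :=
      PySem.List.length_pySetD _ _ _
    obtain ⟨ihlen, ihval⟩ := ih _ (by
      intro x hx
      rw [hlen']
      exact hL x (List.mem_cons_of_mem _ hx))
    refine ⟨by rw [ihlen, hlen'], ?_⟩
    intro k
    rw [ihval k, hset, List.count_cons]
    have hgd : (cs.set j.toNat (cs.getD j.toNat 0 + w)).getD k 0
        = if j.toNat = k then cs.getD j.toNat 0 + w else cs.getD k 0 := by
      rw [List.getD_eq_getElem?_getD, List.getElem?_set, List.getD_eq_getElem?_getD]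
      split_ifs with h1 h2
      · subst h1; simp [List.getElem?_eq_getElem (show j.toNat < cs.length by omega)]
      · omega
      · rfl
    rw [hgd]
    by_cases hk : j = (k : Int)
    · have h3 : j.toNat = k := by omega
      rw [if_pos h3, h3, if_pos (by exact beq_iff_eq.mpr hk)]
      push_cast
      ring
    · have h3 : ¬ (j.toNat = k) := by omega
      rw [if_neg h3, if_neg (by simpa using hk)]
      push_cast
      ring

-- nodup of a positive-step pyRange
theorem nodup_pyRange_pos (a b s : Int) (hs : 0 < s) : (PySem.List.pyRange a b s).Nodup := by
  rw [PySem.List.pyRange_of_pos _ _ hs]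
  refine List.Nodup.map ?_ List.nodup_range
  intro x y h
  have : s * (x : Int) = s * (y : Int) := by linarith
  exact_mod_cast mul_left_cancel₀ (by omega) this

-- count of an element in a positive-step pyRange
theorem count_pyRange_pos (a b s x : Int) (hs : 0 < s) :
    ((PySem.List.pyRange a b s).count x : Int) = if a ≤ x ∧ x < b ∧ s ∣ x - a then 1 else 0 := by
  by_cases h : a ≤ x ∧ x < b ∧ s ∣ x - a
  · rw [if_pos h, List.count_eq_one_of_mem (nodup_pyRange_pos a b s hs)
      ((PySem.List.mem_pyRange_iff_of_pos hs x).mpr h)]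
    rfl
  · rw [if_neg h, List.count_eq_zero_of_not_mem]
    · rfl
    · intro hmem
      exact h ((PySem.List.mem_pyRange_iff_of_pos hs x).mp hmem)

-- A's outer loop, characterised pointwise
theorem outerA_char (n : Int) (I : List Int) (hI : ∀ i ∈ I, 1 ≤ i) (cs : List Int)
    (hlen : cs.length = (n + 1).toNat) :
    (I.foldl (fun ks i => (PySem.List.pyRange i (n + 1) i).foldl
        (fun ks j => PySem.List.pySetD ks j (PySem.List.pyGetD ks j 0 + 1)) ks) cs).length = cs.length ∧
    ∀ k : ℕ, (I.foldl (fun ks i => (PySem.List.pyRange i (n + 1) i).foldl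
        (fun ks j => PySem.List.pySetD ks j (PySem.List.pyGetD ks j 0 + 1)) ks) cs).getD k 0
      = cs.getD k 0 + (I.map (fun i => (((PySem.List.pyRange i (n + 1) i).count (k : Int)) : Int))).sum := by
  induction I generalizing cs with
  | nil => simp
  | cons i I ih =>
    have hi1 : 1 ≤ i := hI i (List.mem_cons_self)
    simp only [List.foldl_cons]
    obtain ⟨slen, sval⟩ := foldl_incr 1 (PySem.List.pyRange i (n + 1) i) cs (by
      intro j hj
      obtain ⟨h1, h2, _⟩ := (PySem.List.mem_pyRange_iff_of_pos (by omega) j).mp hj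
      constructor
      · omega
      · rw [hlen]; omega)
    obtain ⟨ihlen, ihval⟩ := ih (fun x hx => hI x (List.mem_cons_of_mem _ hx)) _ (by rw [slen, hlen])
    refine ⟨by rw [ihlen, slen], ?_⟩
    intro k
    rw [ihval k, sval k, List.map_cons, List.sum_cons]
    ring

theorem toFinset_pyRange_one (a b : Int) : (PySem.List.pyRange a b 1).toFinset = Finset.Ico a b := by
  ext x
  simp [PySem.List.mem_pyRange_one, Finset.mem_Ico]

theorem Icc_of_Ico (n : Int) : Finset.Ico 1 (n + 1) = Finset.Icc 1 n := by
  ext x; simp [Finset.mem_Ico, Finset.mem_Icc]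

-- the list of per-i contributions at index k sums to the divisor count
theorem sumA_eq_fcount (n : Int) (k : ℕ) (hk : (k : Int) ≤ n) :
    ((PySem.List.pyRange 1 (n + 1) 1).map
        (fun i => (((PySem.List.pyRange i (n + 1) i).count (k : Int)) : Int))).sum = fcount n k := by
  have step1 : ∀ i ∈ PySem.List.pyRange 1 (n + 1) 1,
      (((PySem.List.pyRange i (n + 1) i).count (k : Int)) : Int)
        = if i ∣ (k : Int) ∧ i ≤ (k : Int) then (1 : Int) else 0 := by
    intro i hi
    obtain ⟨hi1, hin⟩ := (PySem.List.mem_pyRange_one).mp hi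
    rw [count_pyRange_pos _ _ _ _ (by omega)]
    have hiff : (i ≤ (k : Int) ∧ (k : Int) < n + 1 ∧ i ∣ (k : Int) - i) ↔ (i ∣ (k : Int) ∧ i ≤ (k : Int)) := by
      constructor
      · rintro ⟨h1, _, h3⟩
        have h4 : i ∣ ((k : Int) - i) + i := dvd_add h3 (dvd_refl i)
        simp only [sub_add_cancel] at h4
        exact ⟨h4, h1⟩
      · rintro ⟨h1, h2⟩
        exact ⟨h2, by omega, dvd_sub h1 (dvd_refl i)⟩
    rw [if_congr hiff rfl rfl]
  rw [List.map_congr_left step1,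
    ← List.sum_toFinset _ (nodup_pyRange_pos 1 (n + 1) 1 (by omega)),
    toFinset_pyRange_one, Icc_of_Ico]
  simp [fcount, Finset.sum_boole]

-- the A sieve builds the canonical table
theorem sieveA_char (n : Int) :
    ((PySem.List.pyRange 1 (n + 1) 1).foldl
      (fun ks i => (PySem.List.pyRange i (n + 1) i).foldl
        (fun ks j => PySem.List.pySetD ks j (PySem.List.pyGetD ks j 0 + 1)) ks)
      (List.replicate (n + 1).toNat 0)) = canon n := by
  obtain ⟨len, val⟩ := outerA_char n (PySem.List.pyRange 1 (n + 1) 1)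
    (fun i hi => ((PySem.List.mem_pyRange_one).mp hi).1)
    (List.replicate (n + 1).toNat 0) (List.length_replicate)
  apply List.ext_getElem
  · rw [len, List.length_replicate]; simp [canon]
  · intro idx h1 h2
    have hidx : idx < (n + 1).toNat := by simpa [canon] using h2
    have hc : (canon n)[idx]'h2 = fcount n idx := by
      unfold canon
      rw [List.getElem_map, List.getElem_range]
    rw [hc, ← List.getD_eq_getElem _ 0 h1, val idx,
      sumA_eq_fcount n idx (by omega)]
    simp

-- update of a single cell, read back
theorem getD_set_incr (cs : List Int) (m k : ℕ) (w : Int) (hm : m < cs.length) :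
    (cs.set m (cs.getD m 0 + w)).getD k 0 = cs.getD k 0 + if m = k then w else 0 := by
  by_cases h : m = k
  · subst h
    rw [if_pos rfl, List.getD_eq_getElem?_getD, List.getElem?_set, if_pos rfl, if_pos hm]
    simp [List.getD_eq_getElem?_getD, List.getElem?_eq_getElem hm]
  · rw [if_neg h, List.getD_eq_getElem?_getD, List.getElem?_set, if_neg h,
      ← List.getD_eq_getElem?_getD, add_zero]

-- the generators still to be processed split off the current one
theorem Ed_insert (n d : Int) (hd : 1 ≤ d) (hdd : d * d ≤ n) :
    Ed n d = insert d (Ed n (d + 1)) ∧ d ∉ Ed n (d + 1) := by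
  constructor
  · ext e
    simp only [Ed, Finset.mem_insert, Finset.mem_filter, Finset.mem_Icc]
    constructor
    · rintro ⟨⟨he1, he2⟩, he3⟩
      by_cases he : e = d
      · exact Or.inl he
      · exact Or.inr ⟨⟨by omega, he2⟩, he3⟩
    · rintro (rfl | ⟨⟨he1, he2⟩, he3⟩)
      · exact ⟨⟨le_refl _, by nlinarith⟩, hdd⟩
      · exact ⟨⟨by omega, he2⟩, he3⟩
  · simp only [Ed, Finset.mem_filter, Finset.mem_Icc]
    rintro ⟨⟨he1, _⟩, _⟩
    omega

theorem Ed_empty (n d : Int) (hd : 1 ≤ d) (hdd : ¬ d * d ≤ n) : Ed n d = ∅ := by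
  rw [Ed, Finset.filter_eq_empty_iff]
  intro e he
  rw [Finset.mem_Icc] at he
  nlinarith [he.1, he.2]

-- bSieveLoop characterised pointwise
theorem bSieve_char (n : Int) (d : Int) (hd : 1 ≤ d) (cs : List Int)
    (hlen : cs.length = (n + 1).toNat) :
    (bSieveLoop n d cs).length = cs.length ∧
    ∀ k : ℕ, (k : Int) ≤ n →
      (bSieveLoop n d cs).getD k 0 = cs.getD k 0 + ∑ e ∈ Ed n d, gB e (k : Int) := by
  generalize hm : (n + 1 - d).toNat = m
  induction m using Nat.strong_induction_on generalizing d cs with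
  | _ m ih =>
  rw [bSieveLoop]
  by_cases hdd : d * d ≤ n
  · rw [dif_pos hdd]
    have hn1 : 1 ≤ n := by nlinarith
    have hdn : d ≤ n := by nlinarith
    have hddnn : (0 : Int) ≤ d * d := by positivity
    have hset : PySem.List.pySetD cs (d * d) (PySem.List.pyGetD cs (d * d) 0 + 1)
        = cs.set (d * d).toNat (cs.getD (d * d).toNat 0 + 1) := by
      rw [PySem.List.pySetD_of_nonneg _ _ hddnn, PySem.List.pyGetD_of_nonneg _ _ hddnn]
    have hlen1 : (cs.set (d * d).toNat (cs.getD (d * d).toNat 0 + 1)).length = cs.length := by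
      simp
    obtain ⟨slen, sval⟩ := foldl_incr 2 (PySem.List.pyRange (d * (d + 1)) (n + 1) d)
      (cs.set (d * d).toNat (cs.getD (d * d).toNat 0 + 1)) (by
        intro j hj
        obtain ⟨h1, h2, _⟩ := (PySem.List.mem_pyRange_iff_of_pos (by omega) j).mp hj
        have : (1 : Int) ≤ d * (d + 1) := by nlinarith
        constructor
        · omega
        · rw [hlen1, hlen]; omega)
    obtain ⟨ihlen, ihval⟩ := ih (n + 1 - (d + 1)).toNat (by omega) (d + 1) (by omega) _
      (by rw [slen, hlen1, hlen]) rfl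
    rw [hset]
    refine ⟨by rw [ihlen, slen, hlen1], ?_⟩
    intro k hk
    rw [ihval k hk, sval k, getD_set_incr _ _ _ _ (by rw [hlen]; omega)]
    have hbump1 : (if (d * d).toNat = k then (1 : Int) else 0) = (if d * d = (k : Int) then 1 else 0) := by
      have : (d * d).toNat = k ↔ d * d = (k : Int) := by omega
      rw [if_congr this rfl rfl]
    have hbump2 : ((PySem.List.pyRange (d * (d + 1)) (n + 1) d).count (k : Int) : Int)
        = if d ∣ (k : Int) ∧ d * d < (k : Int) then 1 else 0 := by
      rw [count_pyRange_pos _ _ _ _ (by omega)]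
      have hiff : (d * (d + 1) ≤ (k : Int) ∧ (k : Int) < n + 1 ∧ d ∣ (k : Int) - d * (d + 1))
          ↔ (d ∣ (k : Int) ∧ d * d < (k : Int)) := by
        constructor
        · rintro ⟨h1, _, h3⟩
          have h4 : d ∣ ((k : Int) - d * (d + 1)) + d * (d + 1) :=
            dvd_add h3 (Dvd.intro _ rfl)
          simp only [sub_add_cancel] at h4
          exact ⟨h4, by nlinarith⟩
        · rintro ⟨⟨c, hc⟩, h2⟩
          have hcd : d < c := by nlinarith
          refine ⟨by nlinarith, by omega, dvd_sub ⟨c, hc⟩ (Dvd.intro _ rfl)⟩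
      rw [if_congr hiff rfl rfl]
    obtain ⟨hins, hnotin⟩ := Ed_insert n d hd hdd
    rw [hins, Finset.sum_insert hnotin, hbump1, hbump2, gB]
    ring
  · rw [dif_neg hdd]
    refine ⟨rfl, ?_⟩
    intro k hk
    rw [Ed_empty n d hd hdd]
    simp

-- divisor pairing: divisors above the square root correspond to divisors below it
theorem pairing (k : Int) (hk : 1 ≤ k) :
    ((Finset.Icc 1 k).filter (fun d => d ∣ k ∧ k < d * d)).card
      = ((Finset.Icc 1 k).filter (fun d => d ∣ k ∧ d * d < k)).card := by
  apply Finset.card_bij (fun d _ => k / d)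
  · intro a ha
    simp only [Finset.mem_filter, Finset.mem_Icc] at ha ⊢
    obtain ⟨⟨ha1, hak⟩, ⟨c, hc⟩, hbig⟩ := ha
    have hc0 : k / a = c := by rw [hc]; exact Int.mul_ediv_cancel_left _ (by omega)
    have hc1 : 1 ≤ c := by nlinarith
    have hcd : c < a := by nlinarith
    rw [hc0]
    refine ⟨⟨by omega, by nlinarith⟩, ⟨a, by rw [hc]; ring⟩, by nlinarith⟩
  · intro a1 h1 a2 h2 heq
    simp only [Finset.mem_filter, Finset.mem_Icc] at h1 h2
    obtain ⟨⟨h11, _⟩, ⟨c1, hc1⟩, _⟩ := h1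
    obtain ⟨⟨h21, _⟩, ⟨c2, hc2⟩, _⟩ := h2
    have e1 : k / a1 = c1 := by rw [hc1]; exact Int.mul_ediv_cancel_left _ (by omega)
    have e2 : k / a2 = c2 := by rw [hc2]; exact Int.mul_ediv_cancel_left _ (by omega)
    have hcc : c1 = c2 := by omega
    have hc10 : 1 ≤ c1 := by nlinarith
    have hmm : a1 * c2 = a2 * c2 := by rw [hc1, hcc] at hc2; exact hc2
    exact mul_right_cancel₀ (by omega) hmm
  · intro e he
    simp only [Finset.mem_filter, Finset.mem_Icc] at he
    obtain ⟨⟨he1, hek⟩, ⟨m, hm⟩, hsm⟩ := he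
    have hm1 : 1 ≤ m := by nlinarith
    have hem : e < m := by nlinarith
    refine ⟨m, ?_, ?_⟩
    · simp only [Finset.mem_filter, Finset.mem_Icc]
      exact ⟨⟨by omega, by nlinarith⟩, ⟨e, by rw [hm]; ring⟩, by nlinarith⟩
    · rw [show k = m * e by rw [hm]; ring]
      exact Int.mul_ediv_cancel_left _ (by omega)

-- the B contributions at index k sum to the divisor count
theorem sumB_eq_fcount (n : Int) (k : ℕ) (hk : (k : Int) ≤ n) :
    (∑ e ∈ Ed n 1, gB e (k : Int)) = fcount n k := by
  by_cases hk0 : k = 0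
  · subst hk0
    rw [Finset.sum_eq_zero, fcount]
    · rw [Finset.filter_eq_empty_iff.mpr]
      · simp
      · intro i hi
        rw [Finset.mem_Icc] at hi
        push_cast
        omega
    · intro e he
      simp only [Ed, Finset.mem_filter, Finset.mem_Icc] at he
      obtain ⟨⟨he1, _⟩, _⟩ := he
      rw [gB, if_neg (by push_cast; nlinarith), if_neg (by push_cast; rintro ⟨_, h⟩; nlinarith)]
      ring
  · have hk1 : (1 : Int) ≤ (k : Int) := by omega
    have hEq : (Ed n 1).filter (fun e => e * e = (k : Int))
        = (Finset.Icc 1 (k : Int)).filter (fun d => d ∣ (k : Int) ∧ d * d = (k : Int)) := by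
      ext e
      simp only [Ed, Finset.filter_filter, Finset.mem_filter, Finset.mem_Icc]
      constructor
      · rintro ⟨⟨he1, he2⟩, he3, he4⟩
        exact ⟨⟨he1, by nlinarith⟩, ⟨e, he4.symm⟩, he4⟩
      · rintro ⟨⟨he1, he2⟩, _, he4⟩
        exact ⟨⟨he1, by omega⟩, by omega, he4⟩
    have hLt : (Ed n 1).filter (fun e => e ∣ (k : Int) ∧ e * e < (k : Int))
        = (Finset.Icc 1 (k : Int)).filter (fun d => d ∣ (k : Int) ∧ d * d < (k : Int)) := by
      ext e
      simp only [Ed, Finset.filter_filter, Finset.mem_filter, Finset.mem_Icc]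
      constructor
      · rintro ⟨⟨he1, he2⟩, he3, he4, he5⟩
        exact ⟨⟨he1, Int.le_of_dvd (by omega) he4⟩, he4, he5⟩
      · rintro ⟨⟨he1, he2⟩, he4, he5⟩
        exact ⟨⟨he1, by omega⟩, by omega, he4, he5⟩
    have hF : (Finset.Icc 1 n).filter (fun i => i ∣ (k : Int) ∧ i ≤ (k : Int))
        = (Finset.Icc 1 (k : Int)).filter (fun i => i ∣ (k : Int)) := by
      ext i
      simp only [Finset.mem_filter, Finset.mem_Icc]
      constructor
      · rintro ⟨⟨h1, h2⟩, h3, h4⟩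
        exact ⟨⟨h1, h4⟩, h3⟩
      · rintro ⟨⟨h1, h2⟩, h3⟩
        exact ⟨⟨h1, by omega⟩, h3, h2⟩
    set s0 : Finset Int := (Finset.Icc 1 (k : Int)).filter (fun i => i ∣ (k : Int)) with hs0
    have split1 := Finset.card_filter_add_card_filter_not
      (s := s0) (p := fun d => d * d < (k : Int))
    have split2 := Finset.card_filter_add_card_filter_not
      (s := s0.filter (fun d => ¬ d * d < (k : Int))) (p := fun d => d * d = (k : Int))
    have e1 : (s0.filter (fun d => ¬ d * d < (k : Int))).filter (fun d => d * d = (k : Int))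
        = s0.filter (fun d => d * d = (k : Int)) := by
      rw [Finset.filter_filter]
      apply Finset.filter_congr
      intro d _
      constructor
      · rintro ⟨_, h⟩; exact h
      · intro h; exact ⟨by omega, h⟩
    have e2 : (s0.filter (fun d => ¬ d * d < (k : Int))).filter (fun d => ¬ d * d = (k : Int))
        = s0.filter (fun d => (k : Int) < d * d) := by
      rw [Finset.filter_filter]
      apply Finset.filter_congr
      intro d _
      constructor
      · rintro ⟨h1, h2⟩; omega
      · intro h; exact ⟨by omega, by omega⟩
    have hpair : (s0.filter (fun d => (k : Int) < d * d)).card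
        = (s0.filter (fun d => d * d < (k : Int))).card := by
      rw [hs0, Finset.filter_filter, Finset.filter_filter]
      exact pairing (k : Int) hk1
    rw [fcount, hF]
    unfold gB
    rw [Finset.sum_add_distrib, Finset.sum_boole, ← Finset.mul_sum, Finset.sum_boole, hEq, hLt]
    have hc1 : ((Finset.Icc 1 (k : Int)).filter (fun d => d ∣ (k : Int) ∧ d * d = (k : Int))).card
        = (s0.filter (fun d => d * d = (k : Int))).card := by
      rw [hs0, Finset.filter_filter]
    have hc2 : ((Finset.Icc 1 (k : Int)).filter (fun d => d ∣ (k : Int) ∧ d * d < (k : Int))).card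
        = (s0.filter (fun d => d * d < (k : Int))).card := by
      rw [hs0, Finset.filter_filter]
    rw [hc1, hc2]
    rw [e1, e2, hpair] at split2
    omega

-- the B sieve builds the canonical table
theorem sieveB_char (n : Int) (hn : 0 ≤ n) :
    bSieveLoop n 1 (List.replicate (n + 1).toNat 0) = canon n := by
  obtain ⟨len, val⟩ := bSieve_char n 1 (le_refl 1) (List.replicate (n + 1).toNat 0)
    (List.length_replicate)
  apply List.ext_getElem
  · rw [len, List.length_replicate]; simp [canon]
  · intro idx h1 h2
    have hidx : idx < (n + 1).toNat := by simpa [canon] using h2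
    have hc : (canon n)[idx]'h2 = fcount n idx := by
      unfold canon
      rw [List.getElem_map, List.getElem_range]
    rw [hc, ← List.getD_eq_getElem _ 0 h1, val idx (by omega),
      sumB_eq_fcount n idx (by omega)]
    simp

theorem fcount_zero (n : Int) : fcount n 0 = 0 := by
  rw [fcount, Finset.filter_eq_empty_iff.mpr]
  · simp
  · intro i hi
    rw [Finset.mem_Icc] at hi
    rintro ⟨_, hle⟩
    omega

-- on number ≥ 0, A's total is B's total plus the thresholded index-0 zero
theorem key_split (number limit power : Int) (hn : 0 ≤ number) :
    solution number limit power
      = (if limit < 0 then power else 0) + solution_alt number limit power := by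
  unfold solution solution_alt
  dsimp only
  rw [sieveA_char number, sieveB_char number hn,
    PySem.List.slice_from _ (by norm_num : (0:Int) ≤ 1)]
  obtain ⟨m, hm⟩ : ∃ m, (number + 1).toNat = m + 1 := ⟨number.toNat, by omega⟩
  have hcanon : canon number
      = 0 :: ((List.range m).map (fun j : ℕ => fcount number (((j + 1 : ℕ)) : Int))) := by
    rw [canon, hm, List.range_succ_eq_map, List.map_cons, List.map_map]
    simp [fcount_zero]
  rw [hcanon]
  rw [show ((1:Int).toNat) = 1 from rfl]
  simp only [List.map_cons, List.sum_cons, List.drop_succ_cons, List.drop_zero]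
  rw [PySem.List.foldl_add]
  simp only [zero_add]

-- both programs return 0 on negative number
theorem both_zero_neg (number limit power : Int) (hn : number < 0) :
    solution number limit power = 0 ∧ solution_alt number limit power = 0 := by
  have h1 : (number + 1).toNat = 0 := by omega
  constructor
  · unfold solution
    rw [h1, PySem.List.pyRange_one_eq_nil (by omega)]
    simp
  · unfold solution_alt
    dsimp only
    rw [h1]
    rw [show List.replicate 0 (0:Int) = [] from rfl]
    rw [bSieveLoop]
    rw [dif_neg (by nlinarith [sq_nonneg (1:Int)] : ¬ (1:Int) * 1 ≤ number)]
    simp [PySem.List.slice_from _ (by norm_num : (0:Int) ≤ 1)]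

-- ===== VERDICT (by name: the statement is the Claim_ definition above) =====
theorem solution_spec : Claim_unchanged_solution := by
  intro number limit power _
  unfold Spec_solution
  intro hnd
  by_cases hn : number < 0
  · obtain ⟨h1, h2⟩ := both_zero_neg number limit power hn
    rw [h1, h2]
  · push Not at hn
    rw [key_split number limit power hn]
    unfold D_solution at hnd
    push Not at hnd
    by_cases hl : limit < 0
    · rw [if_pos hl, hnd hn hl, zero_add]
    · rw [if_neg hl, zero_add]

theorem solution_changed : Claim_changed_solution := by
  unfold Claim_changed_solution
  refine ⟨by decide, by decide, by decide, ?_, by decide⟩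
  show solution_alt 1 (-1) 5 = 5
  unfold solution_alt
  rw [bSieveLoop]
  norm_num
  rw [bSieveLoop]
  norm_num [PySem.List.pySetD, PySem.List.pySet?, PySem.List.pyGetD, PySem.List.pyGet?, PySem.List.pyIdx?, PySem.List.pyRange, PySem.List.slice]
  decide

theorem solution_tight : Claim_exact_solution := by
  intro number limit power _ hd
  obtain ⟨hn, hl, hp⟩ := hd
  rw [key_split number limit power hn, if_pos hl]
  omega
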